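-- pv_equiv track=rewrite | github.com/espickle1/sequence-cleaning | embedding/fasta_cleaner.py | handle_duplicate_metadata
-- ===== SOURCE A (Python) =====
-- from collections import defaultdict
-- from typing import Dict, List, Tuple, Union
--
-- def handle_duplicate_metadata(metadata_list: List[Dict]) -> List[Dict]:
--     """
--     Handle entries with identical metadata but distinct sequences.
--
--     Appends version marker to name field (e.g., _v2, _v3) when the same
--     name+date combination appears with different sequence IDs.
--
--     Args:
--         metadata_list: List of metadata dictionaries with sequence_id field
--
--     Returns:
--         Modified metadata list with version markers added where needed
--     """
--     # Group by (name, date) to find duplicates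
--     seen = defaultdict(list)
--
--     for i, meta in enumerate(metadata_list):
--         key = (meta.get("name", ""), meta.get("date", ""))
--         seen[key].append(i)
--
--     # Mark duplicates
--     for key, indices in seen.items():
--         if len(indices) > 1:
--             # Check if sequences are actually different
--             seq_ids = [metadata_list[i]["sequence_id"] for i in indices]
--             if len(set(seq_ids)) > 1:  # Different sequences
--                 for version, idx in enumerate(indices, 1):
--                     if version > 1:  # Don't mark the first one
--                         original_name = metadata_list[idx].get("name", "")
--                         metadata_list[idx]["name"] = f"{original_name}_v{version}"
--
--     return metadata_list
-- ===== SOURCE B (Python) =====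
-- def handle_duplicate_metadata(metadata_list):
--     """Per-entry rewrite: each entry's version number is computed directly from
--     its key's occurrence counts, with no grouping dictionary."""
--     keys = [(m.get("name", ""), m.get("date", "")) for m in metadata_list]
--     n = len(metadata_list)
--     for i, meta in enumerate(metadata_list):
--         k = keys[i]
--         if keys.count(k) > 1:
--             ids = [metadata_list[j]["sequence_id"] for j in range(n) if keys[j] == k]
--             if any(x != ids[0] for x in ids):
--                 v = 1 + keys[:i].count(k)
--                 if v > 1:
--                     meta["name"] = meta.get("name", "") + "_v%d" % v
--     return metadata_list
-- ===== Notes on version B (the rewrite author's own statement) =====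
-- stated objective: alternative
-- what changed: Replaces the defaultdict grouping pass plus per-bucket enumerate-mutation pass by a single per-entry rewrite that computes each entry's version number directly as 1 + the count of its (name,date) key among the earlier keys, with no grouping dictionary.
import Mathlib
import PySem

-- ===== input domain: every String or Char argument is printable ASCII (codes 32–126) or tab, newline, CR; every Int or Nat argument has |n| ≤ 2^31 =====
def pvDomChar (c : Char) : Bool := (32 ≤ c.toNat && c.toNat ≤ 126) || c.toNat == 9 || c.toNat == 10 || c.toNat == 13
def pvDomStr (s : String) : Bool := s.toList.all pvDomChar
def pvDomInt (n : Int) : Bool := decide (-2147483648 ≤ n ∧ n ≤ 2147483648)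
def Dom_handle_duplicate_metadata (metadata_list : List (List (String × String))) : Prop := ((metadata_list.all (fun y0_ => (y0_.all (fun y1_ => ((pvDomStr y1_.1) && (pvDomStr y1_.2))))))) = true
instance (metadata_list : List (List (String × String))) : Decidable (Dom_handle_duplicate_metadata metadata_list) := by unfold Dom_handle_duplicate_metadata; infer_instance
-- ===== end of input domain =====

-- B rewrites each entry directly from occurrence counts of its (name,date) key instead of
-- building a grouping dictionary and mutating per bucket (objective: alternative decomposition).
-- Both A and B mutate metadata_list in place in Python; the equivalence proved here is about the
-- returned value (which is the mutated list itself for both).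

-- ===== PORT A =====
-- shared helper: the (meta.get("name",""), meta.get("date","")) key of an entry
def pvMetaKey (m : List (String × String)) : String × String :=
  ((PySem.Dict.mk m).getD "name" "", (PySem.Dict.mk m).getD "date" "")

-- metadata_list[idx]["name"] = s  (dict item assignment on the entry)
def pvSetName (m : List (String × String)) (s : String) : List (String × String) :=
  ((PySem.Dict.mk m).insert "name" s).items

-- meta["sequence_id"] is ported as getD with default "": Pre_ excludes the KeyError inputs
-- (an entry of a duplicated key group lacking "sequence_id"), so the default is never used there.
def handle_duplicate_metadata (metadata_list : List (List (String × String))) : List (List (String × String)) :=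
  -- seen = defaultdict(list); for i, meta in enumerate(metadata_list): seen[key].append(i)
  let seen : PySem.Dict (String × String) (List Int) :=
    (PySem.List.enumerate metadata_list).foldl
      (fun d p => d.modify (pvMetaKey p.2) [] (fun g => g ++ [p.1])) PySem.Dict.empty
  -- for key, indices in seen.items(): …
  seen.items.foldl
    (fun acc kv =>
      let indices := kv.2
      if indices.length > 1 then
        let seq_ids := indices.map (fun i =>
          (PySem.Dict.mk (PySem.List.pyGetD acc i [])).getD "sequence_id" "")
        if (PySem.Set.ofList seq_ids).length > 1 then
          -- for version, idx in enumerate(indices, 1): if version > 1: append marker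
          (PySem.List.enumerate indices 1).foldl
            (fun acc2 q =>
              if q.1 > 1 then
                let original_name :=
                  (PySem.Dict.mk (PySem.List.pyGetD acc2 q.2 [])).getD "name" ""
                PySem.List.pySetD acc2 q.2
                  (pvSetName (PySem.List.pyGetD acc2 q.2 [])
                    (original_name ++ "_v" ++ PySem.Int.toStr q.1))
              else acc2) acc
        else acc
      else acc) metadata_list

-- ===== PORT B =====
-- literal port of Source B: ids[0] is read as headD "" (ids is never empty where it is read,
-- since the entry's own index always passes the filter); ["sequence_id"] as in port A.
def handle_duplicate_metadata_alt (metadata_list : List (List (String × String))) : List (List (String × String)) :=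
  let keys := metadata_list.map pvMetaKey
  let n : Int := PySem.List.len metadata_list
  (PySem.List.enumerate metadata_list).foldl
    (fun acc p =>
      let i := p.1
      let k := PySem.List.pyGetD keys i ("", "")
      if keys.count k > 1 then
        let ids := ((PySem.List.pyRange 0 n 1).filter
            (fun j => PySem.List.pyGetD keys j ("", "") == k)).map
          (fun j => (PySem.Dict.mk (PySem.List.pyGetD acc j [])).getD "sequence_id" "")
        if ids.any (fun x => x != ids.headD "") then
          let v : Int := 1 + (PySem.List.slice keys none (some i)).count k
          if v > 1 then
            PySem.List.pySetD acc i
              (pvSetName (PySem.List.pyGetD acc i [])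
                ((PySem.Dict.mk (PySem.List.pyGetD acc i [])).getD "name" "" ++ "_v"
                  ++ PySem.Int.toStr v))
          else acc
        else acc
      else acc) metadata_list

-- ===== PRECONDITION & SPEC =====
-- Pre_ excludes exactly the KeyError inputs of the Python: an entry whose (name,date) key occurs
-- more than once but which has no "sequence_id" field (both A and my B raise KeyError there).
def Pre_handle_duplicate_metadata (metadata_list : List (List (String × String))) : Prop :=
  ∀ m ∈ metadata_list,
    1 < (metadata_list.map pvMetaKey).count (pvMetaKey m) →
      (PySem.Dict.mk m).contains "sequence_id" = true
instance (metadata_list : List (List (String × String))) : Decidable (Pre_handle_duplicate_metadata metadata_list) := by unfold Pre_handle_duplicate_metadata; infer_instance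

def pvWitness_handle_duplicate_metadata : (List (List (String × String))) :=
  [[("name", "a"), ("date", "1"), ("sequence_id", "x")],
   [("name", "a"), ("date", "1"), ("sequence_id", "y")]]

def Spec_handle_duplicate_metadata (metadata_list : List (List (String × String))) (out : List (List (String × String))) : Prop := out = handle_duplicate_metadata_alt metadata_list
instance (metadata_list : List (List (String × String))) (out : List (List (String × String))) : Decidable (Spec_handle_duplicate_metadata metadata_list out) := by unfold Spec_handle_duplicate_metadata; infer_instance

-- ===== CLAIM (what is proved, stated in full; the proofs are below) =====
def Claim_equal_handle_duplicate_metadata : Prop := ∀ (metadata_list : List (List (String × String))), Dom_handle_duplicate_metadata metadata_list → Pre_handle_duplicate_metadata metadata_list → Spec_handle_duplicate_metadata metadata_list (handle_duplicate_metadata metadata_list)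

-- ===== LEMMAS AND PROOFS =====

-- the entry stored at position j (Python reads entries through the list being mutated)
def pvSid (m : List (String × String)) : String := (PySem.Dict.mk m).getD "sequence_id" ""
def pvKeyAt (L : List (List (String × String))) (j : Nat) : String × String := pvMetaKey (L.getD j [])
-- ascending list of original indices whose key is k
def pvGrp (L : List (List (String × String))) (k : String × String) : List Nat :=
  (List.range L.length).filter (fun j => pvKeyAt L j == k)
-- number of earlier indices with the same key as j
def pvRk (L : List (List (String × String))) (j : Nat) : Nat :=
  ((List.range j).filter (fun j' => pvKeyAt L j' == pvKeyAt L j)).length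
-- the group of key k qualifies for marking
def pvCgrp (L : List (List (String × String))) (k : String × String) : Bool :=
  decide (1 < (pvGrp L k).length) &&
  decide (1 < (PySem.Set.ofList ((pvGrp L k).map (fun j => pvSid (L.getD j [])))).length)
def pvUpd (L : List (List (String × String))) (j : Nat) : List (String × String) :=
  pvSetName (L.getD j [])
    ((PySem.Dict.mk (L.getD j [])).getD "name" "" ++ "_v" ++ PySem.Int.toStr (1 + (pvRk L j : Int)))
-- final value of entry j
def pvF (L : List (List (String × String))) (j : Nat) : List (String × String) :=
  if pvCgrp L (pvKeyAt L j) && decide (0 < pvRk L j) then pvUpd L j else L.getD j []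
-- partially processed list: entries j with P j are final, the rest original
def pvBlend (L : List (List (String × String))) (P : Nat → Bool) : List (List (String × String)) :=
  (List.range L.length).map (fun j => if P j then pvF L j else L.getD j [])

theorem pvBlend_getD (L : List (List (String × String))) (P : Nat → Bool) {j : Nat}
    (h : j < L.length) :
    (pvBlend L P).getD j [] = if P j then pvF L j else L.getD j [] := by
  unfold pvBlend
  rw [List.getD_eq_getElem _ _ (by simpa using h)]
  simp [h]

theorem pvBlend_congr (L : List (List (String × String))) (P Q : Nat → Bool)
    (h : ∀ j < L.length, P j = Q j) : pvBlend L P = pvBlend L Q := by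
  unfold pvBlend
  apply List.map_congr_left
  intro j hj
  rw [h j (List.mem_range.mp hj)]

theorem pvBlend_false (L : List (List (String × String))) :
    pvBlend L (fun _ => false) = L := by
  unfold pvBlend
  simp only [Bool.false_eq_true, if_false]
  apply List.ext_getElem (by simp)
  intro i h1 h2
  simp [List.getElem?_eq_getElem h2]

theorem pvSid_setName (m : List (String × String)) (s : String) :
    pvSid (pvSetName m s) = pvSid m := by
  unfold pvSid pvSetName
  exact PySem.Dict.getD_insert_of_ne (PySem.Dict.mk m) s "" (by decide)

theorem pvSid_F (L : List (List (String × String))) (j : Nat) :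
    pvSid (pvF L j) = pvSid (L.getD j []) := by
  unfold pvF
  split_ifs with h
  · unfold pvUpd; exact pvSid_setName _ _
  · rfl

theorem pvSid_blend (L : List (List (String × String))) (P : Nat → Bool) {j : Nat}
    (h : j < L.length) : pvSid ((pvBlend L P).getD j []) = pvSid (L.getD j []) := by
  rw [pvBlend_getD _ _ h]
  split_ifs with hp
  · exact pvSid_F _ _
  · rfl

-- generic: count as a filtered index scan
theorem pvCount_getD {α : Type} [BEq α] [LawfulBEq α] (xs : List α) (k d : α) :
    xs.count k = ((List.range xs.length).filter (fun j => xs.getD j d == k)).length := by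
  induction xs with
  | nil => simp
  | cons x xs ih =>
    rw [List.count_cons, ih]
    simp only [List.length_cons, List.range_succ_eq_map, List.filter_cons,
      List.filter_map, List.getD_cons_zero, Function.comp_def,
      List.getD_cons_succ]
    by_cases hx : x == k
    · simp [hx]
    · simp [hx]

theorem pvRange_filter_lt {n j : Nat} (h : j ≤ n) :
    (List.range n).filter (fun x => decide (x < j)) = List.range j := by
  induction n with
  | zero => cases Nat.eq_zero_of_le_zero h; simp
  | succ n ih =>
    by_cases hj : j ≤ n
    · rw [List.range_succ, List.filter_append, ih hj]
      have : ¬ (n < j) := by omega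
      simp [this]
    · have hj' : j = n + 1 := by omega
      subst hj'
      apply List.filter_eq_self.mpr
      intro a ha
      simp [List.mem_range.mp ha]

theorem pvFilter_lt_of_pairwise : ∀ (G : List Nat), G.Pairwise (· < ·) →
    ∀ (t j : Nat), G[t]? = some j → (G.filter (fun x => decide (x < j))).length = t := by
  intro G hG
  induction G with
  | nil => intro t j h; simp at h
  | cons a G ih =>
    rcases List.pairwise_cons.mp hG with ⟨ha, hG'⟩
    intro t j h
    cases t with
    | zero =>
      simp only [List.getElem?_cons_zero, Option.some.injEq] at h
      subst h
      simp only [List.filter_cons, lt_irrefl, decide_false, Bool.false_eq_true, if_false]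
      rw [List.filter_eq_nil_iff.mpr, List.length_nil]
      intro b hb
      have := ha b hb
      simp; omega
    | succ t =>
      rw [List.getElem?_cons_succ] at h
      have hj : j ∈ G := List.mem_of_getElem? h
      have hb : a < j := ha _ hj
      simp only [List.filter_cons, hb, decide_true, if_true, List.length_cons]
      rw [ih hG' t j h]

theorem pvGrp_pairwise (L : List (List (String × String))) (k : String × String) :
    (pvGrp L k).Pairwise (· < ·) := by
  unfold pvGrp
  exact List.Pairwise.filter _ (List.pairwise_lt_range)

theorem pvGrp_mem {L : List (List (String × String))} {k : String × String} {j : Nat}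
    (h : j ∈ pvGrp L k) : j < L.length ∧ pvKeyAt L j = k := by
  unfold pvGrp at h
  rw [List.mem_filter, List.mem_range] at h
  exact ⟨h.1, by simpa using h.2⟩

theorem pvMem_grp {L : List (List (String × String))} {j : Nat} (h : j < L.length) :
    j ∈ pvGrp L (pvKeyAt L j) := by
  unfold pvGrp
  rw [List.mem_filter, List.mem_range]
  exact ⟨h, by simp⟩

theorem pvRk_grp (L : List (List (String × String))) (k : String × String) (t : Nat)
    (h : t < (pvGrp L k).length) : pvRk L ((pvGrp L k)[t]) = t := by
  have hjm : (pvGrp L k)[t] ∈ pvGrp L k := List.getElem_mem _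
  rcases pvGrp_mem hjm with ⟨hlt, hkey⟩
  unfold pvRk
  rw [hkey]
  have key : ∀ j, j < L.length → (pvGrp L k).filter (fun x => decide (x < j))
      = (List.range j).filter (fun j' => pvKeyAt L j' == k) := by
    intro j hj
    unfold pvGrp
    rw [List.filter_filter, ← pvRange_filter_lt (n := L.length) (le_of_lt hj),
      List.filter_filter]
    apply List.filter_congr
    intro a _
    exact Bool.and_comm _ _
  rw [← key _ hlt]
  exact pvFilter_lt_of_pairwise _ (pvGrp_pairwise L k) t _ (List.getElem?_eq_getElem h)

theorem pvKeys_count (L : List (List (String × String))) (k : String × String) :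
    (L.map pvMetaKey).count k = (pvGrp L k).length := by
  rw [pvCount_getD (xs := L.map pvMetaKey) k ("", "")]
  unfold pvGrp
  rw [List.length_map]
  congr 1
  apply List.filter_congr
  intro j hj
  have hj' := List.mem_range.mp hj
  unfold pvKeyAt
  congr 1
  rw [List.getD_eq_getElem _ _ (by simpa using hj'), List.getD_eq_getElem _ _ hj',
    List.getElem_map]

theorem pvKeys_take_count (L : List (List (String × String))) (k : String × String) {t : Nat}
    (h : t < L.length) :
    ((L.map pvMetaKey).take t).count k
      = ((List.range t).filter (fun j => pvKeyAt L j == k)).length := by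
  rw [pvCount_getD (xs := (L.map pvMetaKey).take t) k ("", "")]
  have hl : ((L.map pvMetaKey).take t).length = t := by simp; omega
  rw [hl]
  congr 1
  apply List.filter_congr
  intro j hj
  have hj' := List.mem_range.mp hj
  unfold pvKeyAt
  congr 1
  rw [List.getD_eq_getElem _ _ (by omega : j < ((L.map pvMetaKey).take t).length),
    List.getD_eq_getElem _ _ (by omega : j < L.length), List.getElem_take,
    List.getElem_map]

theorem pvOne_lt_ofList_iff (a : String) (l : List String) :
    1 < (PySem.Set.ofList (a :: l)).length ↔
      ((a :: l).any (fun x => x != (a :: l).headD "")) = true := by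
  have h2 : (PySem.Set.ofList (a :: l)).toFinset = (a :: l).toFinset := by
    ext x
    simp [List.mem_toFinset, PySem.Set.mem_ofList]
  rw [← List.toFinset_card_of_nodup (PySem.Set.nodup_ofList (a :: l)), h2,
    Finset.one_lt_card]
  simp only [List.mem_toFinset, List.headD_cons, List.any_cons, bne_self_eq_false,
    Bool.false_or, List.any_eq_true, bne_iff_ne]
  constructor
  · rintro ⟨x, hx, y, hy, hxy⟩
    rcases List.mem_cons.mp hx with rfl | hx'
    · rcases List.mem_cons.mp hy with rfl | hy'
      · exact absurd rfl hxy
      · exact ⟨y, hy', fun h => hxy h.symm⟩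
    · by_cases hxa : x = a
      · subst hxa
        rcases List.mem_cons.mp hy with rfl | hy'
        · exact absurd rfl hxy
        · exact ⟨y, hy', fun h => hxy h.symm⟩
      · exact ⟨x, hx', hxa⟩
  · rintro ⟨x, hxl, hxa⟩
    exact ⟨a, List.mem_cons_self, x, List.mem_cons_of_mem _ hxl, fun h => hxa h.symm⟩

theorem pvEnumerate_eq (L : List (List (String × String))) :
    PySem.List.enumerate L
      = (List.range L.length).map (fun (j : Nat) => ((j : Int), L.getD j [])) := by
  rw [PySem.List.enumerate_eq_map_pyRange L [], PySem.List.pyRange_one]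
  simp [PySem.List.len_eq, List.map_map, Function.comp_def, PySem.List.pyGetD_natCast]

-- the literal step lambdas of the two ports, named so the fold lemmas can speak about them
def pvInnerStepA (acc2 : List (List (String × String))) (q : Int × Int) :
    List (List (String × String)) :=
  if q.1 > 1 then
    let original_name := (PySem.Dict.mk (PySem.List.pyGetD acc2 q.2 [])).getD "name" ""
    PySem.List.pySetD acc2 q.2
      (pvSetName (PySem.List.pyGetD acc2 q.2 [])
        (original_name ++ "_v" ++ PySem.Int.toStr q.1))
  else acc2

def pvStepA (acc : List (List (String × String))) (kv : (String × String) × List Int) :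
    List (List (String × String)) :=
  let indices := kv.2
  if indices.length > 1 then
    let seq_ids := indices.map (fun i =>
      (PySem.Dict.mk (PySem.List.pyGetD acc i [])).getD "sequence_id" "")
    if (PySem.Set.ofList seq_ids).length > 1 then
      (PySem.List.enumerate indices 1).foldl pvInnerStepA acc
    else acc
  else acc

def pvStepB (keys : List (String × String)) (n : Int)
    (acc : List (List (String × String))) (p : Int × List (String × String)) :
    List (List (String × String)) :=
  let i := p.1
  let k := PySem.List.pyGetD keys i ("", "")
  if keys.count k > 1 then
    let ids := ((PySem.List.pyRange 0 n 1).filter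
        (fun j => PySem.List.pyGetD keys j ("", "") == k)).map
      (fun j => (PySem.Dict.mk (PySem.List.pyGetD acc j [])).getD "sequence_id" "")
    if ids.any (fun x => x != ids.headD "") then
      let v : Int := 1 + (PySem.List.slice keys none (some i)).count k
      if v > 1 then
        PySem.List.pySetD acc i
          (pvSetName (PySem.List.pyGetD acc i [])
            ((PySem.Dict.mk (PySem.List.pyGetD acc i [])).getD "name" "" ++ "_v"
              ++ PySem.Int.toStr v))
      else acc
    else acc
  else acc

theorem pvA_fold (L : List (List (String × String))) :
    handle_duplicate_metadata L
      = ((PySem.List.enumerate L).foldl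
          (fun d p => d.modify (pvMetaKey p.2) [] (fun g => g ++ [p.1]))
          (PySem.Dict.empty : PySem.Dict (String × String) (List Int))).items.foldl pvStepA L := rfl

theorem pvB_fold (L : List (List (String × String))) :
    handle_duplicate_metadata_alt L
      = (PySem.List.enumerate L).foldl (pvStepB (L.map pvMetaKey) (PySem.List.len L)) L := rfl

theorem pvKeysGetD {L : List (List (String × String))} {t : Nat} (h : t < L.length) :
    (L.map pvMetaKey).getD t ("", "") = pvKeyAt L t := by
  unfold pvKeyAt
  rw [List.getD_eq_getElem _ _ (by simpa using h), List.getD_eq_getElem _ _ h,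
    List.getElem_map]

theorem pvBlend_set (L : List (List (String × String))) (P : Nat → Bool) (t : Nat) :
    (pvBlend L P).set t (pvF L t) = pvBlend L (fun j => P j || decide (j = t)) := by
  unfold pvBlend
  apply List.ext_getElem (by simp)
  intro i h1 h2
  rw [List.getElem_set]
  by_cases hit : t = i
  · subst hit
    simp
  · have hit' : ¬ (i = t) := fun h => hit h.symm
    simp [hit, hit']

theorem pvBlend_noop (L : List (List (String × String))) (P : Nat → Bool) {t : Nat}
    (hF : pvF L t = L.getD t []) :
    pvBlend L (fun j => P j || decide (j = t)) = pvBlend L P := by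
  unfold pvBlend
  apply List.map_congr_left
  intro j hj
  by_cases hjt : j = t
  · subst hjt
    simp [hF]
  · simp [hjt]

theorem pvNot_mem_take : ∀ (G : List Nat), G.Pairwise (· < ·) →
    ∀ (t : Nat) (h : t < G.length), G[t] ∉ G.take t := by
  intro G hG
  induction G with
  | nil => intro t h; simp at h
  | cons a G ih =>
    rcases List.pairwise_cons.mp hG with ⟨ha, hG'⟩
    intro t h
    cases t with
    | zero => simp
    | succ t =>
      have ht : t < G.length := by simpa using h
      simp only [List.getElem_cons_succ, List.take_succ_cons]
      intro hcon
      rcases List.mem_cons.mp hcon with hEq | hMem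
      · have := ha _ (List.getElem_mem ht)
        omega
      · exact ih hG' t ht hMem

theorem pvInnerA (L : List (List (String × String))) (k : String × String)
    (P : Nat → Bool) (hP : ∀ j < L.length, pvKeyAt L j = k → P j = false)
    (hC : pvCgrp L k = true) :
    ∀ (t : Nat), t ≤ (pvGrp L k).length →
      (PySem.List.enumerate (((pvGrp L k).take t).map (fun (j : Nat) => (j : Int))) 1).foldl
          pvInnerStepA (pvBlend L P)
        = pvBlend L (fun j => P j || decide (j ∈ (pvGrp L k).take t)) := by
  intro t
  induction t with
  | zero =>
    intro _
    simp only [List.take_zero, List.map_nil, PySem.List.enumerate_nil, List.foldl_nil]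
    apply pvBlend_congr
    intro j _
    simp
  | succ t ih =>
    intro hle
    have ht : t < (pvGrp L k).length := by omega
    have htake : (pvGrp L k).take (t + 1) = (pvGrp L k).take t ++ [(pvGrp L k)[t]] := by
      rw [List.take_add_one, List.getElem?_eq_getElem ht]
      rfl
    rcases pvGrp_mem (List.getElem_mem ht) with ⟨hjlt, hjkey⟩
    have hrk : pvRk L ((pvGrp L k)[t]) = t := pvRk_grp L k t ht
    have hnt : (pvGrp L k)[t] ∉ (pvGrp L k).take t :=
      pvNot_mem_take _ (pvGrp_pairwise L k) t ht
    have hQ : (P ((pvGrp L k)[t]) || decide ((pvGrp L k)[t] ∈ (pvGrp L k).take t)) = false := by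
      simp [hP _ hjlt hjkey, hnt]
    have hlen : (((pvGrp L k).take t).map (fun (j : Nat) => (j : Int))).length = t := by
      simp [List.length_take, Nat.min_eq_left (le_of_lt ht)]
    rw [htake, List.map_append, PySem.List.enumerate_append, List.foldl_append,
      ih (by omega), hlen]
    simp only [List.map_cons, List.map_nil, PySem.List.enumerate_cons,
      PySem.List.enumerate_nil, List.foldl_cons, List.foldl_nil]
    have hcongr : ∀ (X : List (List (String × String))),
        X = pvBlend L (fun j => (P j ||
              decide (j ∈ (pvGrp L k).take t)) || decide (j = (pvGrp L k)[t])) →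
        X = pvBlend L (fun j => P j ||
              decide (j ∈ (pvGrp L k).take t ++ [(pvGrp L k)[t]])) := by
      intro X hX
      rw [hX]
      apply pvBlend_congr
      intro j _
      have hmem : (j ∈ (pvGrp L k).take t ++ [(pvGrp L k)[t]])
          ↔ (j ∈ (pvGrp L k).take t ∨ j = (pvGrp L k)[t]) := by
        rw [List.mem_append, List.mem_singleton]
      simp only [hmem]
      by_cases h1 : j ∈ (pvGrp L k).take t <;>
        by_cases h2 : j = (pvGrp L k)[t] <;>
          simp [h1, h2]
    by_cases ht0 : 0 < t
    · apply hcongr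
      unfold pvInnerStepA
      rw [if_pos (by omega)]
      simp only [PySem.List.pyGetD_natCast, PySem.List.pySetD_natCast]
      rw [pvBlend_getD _ _ hjlt, hQ]
      simp only [Bool.false_eq_true, if_false]
      have hF : pvF L ((pvGrp L k)[t])
          = pvSetName (L.getD ((pvGrp L k)[t]) [])
              ((PySem.Dict.mk (L.getD ((pvGrp L k)[t]) [])).getD "name" "" ++ "_v"
                ++ PySem.Int.toStr (1 + (t : Int))) := by
        unfold pvF pvUpd
        rw [hjkey, hC, hrk]
        simp [ht0]
      rw [← hF, pvBlend_set L _ _]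
    · have ht0' : t = 0 := by omega
      subst ht0'
      apply hcongr
      unfold pvInnerStepA
      rw [if_neg (by norm_num)]
      have hF0 : pvF L ((pvGrp L k)[0]) = L.getD ((pvGrp L k)[0]) [] := by
        unfold pvF
        rw [hrk]
        simp
      rw [pvBlend_noop _ _ hF0]

theorem pvBlend_snoc_of_notC (L : List (List (String × String))) (k : String × String)
    (S : List (String × String)) (hC : pvCgrp L k = false) :
    pvBlend L (fun j => decide (pvKeyAt L j ∈ S ++ [k]))
      = pvBlend L (fun j => decide (pvKeyAt L j ∈ S)) := by
  unfold pvBlend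
  apply List.map_congr_left
  intro j hj
  by_cases hjk : pvKeyAt L j = k
  · have hF : pvF L j = L.getD j [] := by
      unfold pvF
      rw [hjk, hC]
      simp
    by_cases hS : pvKeyAt L j ∈ S <;> simp [List.mem_append, hjk, hF]
  · simp [List.mem_append, hjk]

theorem pvBucketA (L : List (List (String × String))) (k : String × String)
    (S : List (String × String)) (hk : k ∉ S) :
    pvStepA (pvBlend L (fun j => decide (pvKeyAt L j ∈ S)))
        (k, (pvGrp L k).map (fun (j : Nat) => (j : Int)))
      = pvBlend L (fun j => decide (pvKeyAt L j ∈ S ++ [k])) := by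
  have hseq : ((pvGrp L k).map (fun (j : Nat) => (j : Int))).map
      (fun i => (PySem.Dict.mk (PySem.List.pyGetD
          (pvBlend L (fun j => decide (pvKeyAt L j ∈ S))) i [])).getD "sequence_id" "")
      = (pvGrp L k).map (fun j => pvSid (L.getD j [])) := by
    rw [List.map_map]
    apply List.map_congr_left
    intro j hj
    have hjn := (pvGrp_mem hj).1
    show (PySem.Dict.mk (PySem.List.pyGetD _ ((j : Nat) : Int) [])).getD "sequence_id" "" = _
    rw [PySem.List.pyGetD_natCast]
    exact pvSid_blend L _ hjn
  unfold pvStepA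
  dsimp only
  rw [hseq, List.length_map]
  by_cases hlen : 1 < (pvGrp L k).length
  · rw [if_pos hlen]
    by_cases hset : 1 < (PySem.Set.ofList ((pvGrp L k).map (fun j => pvSid (L.getD j [])))).length
    · rw [if_pos hset]
      have hC : pvCgrp L k = true := by
        unfold pvCgrp
        rw [decide_eq_true hlen, decide_eq_true hset]
        rfl
      have hP : ∀ j < L.length, pvKeyAt L j = k →
          (fun j => decide (pvKeyAt L j ∈ S)) j = false := by
        intro j _ hkey
        simp [hkey, hk]
      have hinner := pvInnerA L k _ hP hC (pvGrp L k).length le_rfl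
      rw [List.take_length] at hinner
      rw [hinner]
      apply pvBlend_congr
      intro j hj
      have hiff : (j ∈ pvGrp L k) ↔ pvKeyAt L j = k := by
        constructor
        · intro hjm
          exact (pvGrp_mem hjm).2
        · intro hkey
          have := pvMem_grp hj
          rwa [hkey] at this
      by_cases h1 : pvKeyAt L j ∈ S <;> by_cases h2 : pvKeyAt L j = k <;>
        simp [List.mem_append, h1, h2, hiff]
    · rw [if_neg hset]
      have hC : pvCgrp L k = false := by
        unfold pvCgrp
        rw [decide_eq_false hset, Bool.and_false]
      rw [pvBlend_snoc_of_notC L k S hC]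
  · rw [if_neg hlen]
    have hC : pvCgrp L k = false := by
      unfold pvCgrp
      rw [decide_eq_false hlen, Bool.false_and]
    rw [pvBlend_snoc_of_notC L k S hC]

theorem pvOuterA (L : List (List (String × String))) :
    ∀ (ks S : List (String × String)), (S ++ ks).Nodup →
      ks.foldl (fun acc k => pvStepA acc (k, (pvGrp L k).map (fun (j : Nat) => (j : Int))))
          (pvBlend L (fun j => decide (pvKeyAt L j ∈ S)))
        = pvBlend L (fun j => decide (pvKeyAt L j ∈ S ++ ks)) := by
  intro ks
  induction ks with
  | nil =>
    intro S _
    simp only [List.foldl_nil, List.append_nil]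
  | cons k ks ih =>
    intro S hnd
    rw [List.foldl_cons]
    have hk : k ∉ S := fun hmem =>
      (List.disjoint_of_nodup_append hnd) hmem List.mem_cons_self
    rw [pvBucketA L k S hk]
    have hnd' : ((S ++ [k]) ++ ks).Nodup := by
      rw [List.append_assoc, List.singleton_append]
      exact hnd
    rw [ih (S ++ [k]) hnd']
    apply pvBlend_congr
    intro j _
    rw [List.append_assoc, List.singleton_append]

theorem pvPyRangeLen {α : Type} (L : List α) :
    PySem.List.pyRange 0 (PySem.List.len L) 1
      = (List.range L.length).map (fun (j : Nat) => (j : Int)) := by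
  rw [PySem.List.pyRange_one]
  simp [PySem.List.len_eq]

theorem pvSeen_items (L : List (List (String × String))) :
    ((PySem.List.enumerate L).foldl
        (fun d p => d.modify (pvMetaKey p.2) [] (fun g => g ++ [p.1]))
        (PySem.Dict.empty : PySem.Dict (String × String) (List Int))).items
      = (PySem.Set.ofList (L.map pvMetaKey)).map
          (fun k => (k, (pvGrp L k).map (fun (j : Nat) => (j : Int)))) := by
  have hfold : (PySem.List.enumerate L).foldl
      (fun d p => d.modify (pvMetaKey p.2) [] (fun g => g ++ [p.1]))
      (PySem.Dict.empty : PySem.Dict (String × String) (List Int))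
    = ((PySem.List.enumerate L).map (fun p => (pvMetaKey p.2, p.1))).foldl
      (fun d q => d.modify q.1 [] (fun g => g ++ [q.2])) PySem.Dict.empty := by
    rw [List.foldl_map]
  have hkeys : ((PySem.List.enumerate L).foldl
      (fun d p => d.modify (pvMetaKey p.2) [] (fun g => g ++ [p.1]))
      (PySem.Dict.empty : PySem.Dict (String × String) (List Int))).keys
      = PySem.Set.ofList (L.map pvMetaKey) := by
    rw [PySem.Dict.keys_foldl_modify_key (PySem.List.enumerate L)
      (fun p => pvMetaKey p.2) [] (fun _ p _ => _ ++ [p.1])]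
    rw [show (PySem.Dict.empty : PySem.Dict (String × String) (List Int)).keys = [] from rfl,
      PySem.Set.update_nil_left]
    congr 1
    rw [show (fun (p : Int × List (String × String)) => pvMetaKey p.2)
        = (pvMetaKey ∘ Prod.snd) from rfl, ← List.map_map, PySem.List.map_snd_enumerate]
  have hnd : ((PySem.List.enumerate L).foldl
      (fun d p => d.modify (pvMetaKey p.2) [] (fun g => g ++ [p.1]))
      (PySem.Dict.empty : PySem.Dict (String × String) (List Int))).keys.Nodup :=
    PySem.Dict.nodup_keys_foldl_modify_key _ _ _ _ _ PySem.Dict.nodup_keys_empty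
  have hgd : ∀ c, ((PySem.List.enumerate L).foldl
      (fun d p => d.modify (pvMetaKey p.2) [] (fun g => g ++ [p.1]))
      (PySem.Dict.empty : PySem.Dict (String × String) (List Int))).getD c []
      = (pvGrp L c).map (fun (j : Nat) => (j : Int)) := by
    intro c
    rw [hfold, PySem.Dict.getD_foldl_modify_append]
    rw [show (PySem.Dict.empty : PySem.Dict (String × String) (List Int)).getD c [] = []
      from rfl, List.nil_append]
    rw [pvEnumerate_eq, List.map_map, List.filter_map, List.map_map]
    rfl
  rw [PySem.Dict.items_eq_map_keys _ hnd [], hkeys]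
  apply List.map_congr_left
  intro c _
  rw [hgd c]

theorem pvA_eq (L : List (List (String × String))) :
    handle_duplicate_metadata L = pvBlend L (fun _ => true) := by
  rw [pvA_fold, pvSeen_items, List.foldl_map]
  have hstep := pvOuterA L (PySem.Set.ofList (L.map pvMetaKey)) [] (by
    rw [List.nil_append]
    exact PySem.Set.nodup_ofList _)
  rw [List.nil_append] at hstep
  have h0 : pvBlend L (fun j => decide (pvKeyAt L j ∈ ([] : List (String × String)))) = L := by
    rw [show (fun j => decide (pvKeyAt L j ∈ ([] : List (String × String))))
        = (fun _ => false) from by funext j; simp, pvBlend_false]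
  rw [h0] at hstep
  rw [hstep]
  apply pvBlend_congr
  intro j hj
  have : pvKeyAt L j ∈ PySem.Set.ofList (L.map pvMetaKey) := by
    rw [PySem.Set.mem_ofList]
    exact List.mem_map_of_mem (by rw [List.getD_eq_getElem _ _ hj]; exact List.getElem_mem hj)
  simp [this]

theorem pvB_step (L : List (List (String × String))) {t : Nat} (ht : t < L.length) :
    pvStepB (L.map pvMetaKey) (PySem.List.len L)
        (pvBlend L (fun j => decide (j < t))) ((t : Int), L.getD t [])
      = pvBlend L (fun j => decide (j < t + 1)) := by
  have hnoop : pvF L t = L.getD t [] →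
      pvBlend L (fun j => decide (j < t)) = pvBlend L (fun j => decide (j < t + 1)) := by
    intro hF
    have h1 : pvBlend L (fun j => decide (j < t + 1))
        = pvBlend L (fun j => decide (j < t) || decide (j = t)) := by
      apply pvBlend_congr
      intro j _
      have homega : (j < t + 1) ↔ (j < t ∨ j = t) := by omega
      by_cases ja : j < t <;> by_cases jb : j = t <;> simp [homega, ja, jb]
    rw [h1, pvBlend_noop _ _ hF]
  unfold pvStepB
  dsimp only
  rw [PySem.List.pyGetD_natCast, pvKeysGetD ht, pvKeys_count]
  have hids : ((PySem.List.pyRange 0 (PySem.List.len L) 1).filter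
        (fun j => PySem.List.pyGetD (L.map pvMetaKey) j ("", "") == pvKeyAt L t)).map
      (fun j => (PySem.Dict.mk (PySem.List.pyGetD
          (pvBlend L (fun j => decide (j < t))) j [])).getD "sequence_id" "")
      = (pvGrp L (pvKeyAt L t)).map (fun j => pvSid (L.getD j [])) := by
    rw [pvPyRangeLen, List.filter_map, List.map_map]
    simp only [Function.comp_def, PySem.List.pyGetD_natCast]
    have hfil : (List.range L.length).filter
        (fun j => (L.map pvMetaKey).getD j ("", "") == pvKeyAt L t)
        = pvGrp L (pvKeyAt L t) := by
      unfold pvGrp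
      apply List.filter_congr
      intro j hj
      rw [pvKeysGetD (List.mem_range.mp hj)]
    rw [hfil]
    apply List.map_congr_left
    intro j hj
    exact pvSid_blend L _ (pvGrp_mem hj).1
  rw [hids]
  by_cases hlen : 1 < (pvGrp L (pvKeyAt L t)).length
  · rw [if_pos hlen]
    obtain ⟨g0, gs, hgrp⟩ : ∃ g0 gs, pvGrp L (pvKeyAt L t) = g0 :: gs := by
      cases h : pvGrp L (pvKeyAt L t) with
      | nil => rw [h] at hlen; simp at hlen
      | cons a l => exact ⟨a, l, rfl⟩
    rw [hgrp, List.map_cons]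
    by_cases hany : ((pvSid (L.getD g0 []) :: gs.map (fun j => pvSid (L.getD j []))).any
          (fun x => x != (pvSid (L.getD g0 []) :: gs.map (fun j => pvSid (L.getD j []))).headD ""))
        = true
    · rw [if_pos hany]
      have hset' : 1 < (PySem.Set.ofList
          ((pvGrp L (pvKeyAt L t)).map (fun j => pvSid (L.getD j [])))).length := by
        rw [hgrp, List.map_cons]
        exact (pvOne_lt_ofList_iff _ _).mpr hany
      have hC : pvCgrp L (pvKeyAt L t) = true := by
        unfold pvCgrp
        rw [decide_eq_true hlen, decide_eq_true hset']
        rfl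
      rw [PySem.List.slice_to_natCast, pvKeys_take_count _ _ ht]
      have hrkeq : ((List.range t).filter (fun j => pvKeyAt L j == pvKeyAt L t)).length
          = pvRk L t := rfl
      rw [hrkeq]
      by_cases hrk : 0 < pvRk L t
      · rw [if_pos (by omega)]
        rw [PySem.List.pyGetD_natCast, PySem.List.pySetD_natCast, pvBlend_getD _ _ ht]
        rw [show (decide (t < t)) = false from by simp]
        simp only [Bool.false_eq_true, if_false]
        have hF : pvF L t = pvSetName (L.getD t [])
            ((PySem.Dict.mk (L.getD t [])).getD "name" "" ++ "_v"
              ++ PySem.Int.toStr (1 + (pvRk L t : Int))) := by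
          unfold pvF pvUpd
          rw [hC, decide_eq_true hrk]
          rfl
        rw [← hF, pvBlend_set L _ _]
        apply pvBlend_congr
        intro j _
        have homega : (j < t + 1) ↔ (j < t ∨ j = t) := by omega
        by_cases ja : j < t <;> by_cases jb : j = t <;> simp [homega, ja, jb]
      · rw [if_neg (by omega)]
        apply hnoop
        unfold pvF
        rw [decide_eq_false hrk, Bool.and_false]
        rfl
    · rw [if_neg (by simpa using hany)]
      apply hnoop
      unfold pvF
      have hC : pvCgrp L (pvKeyAt L t) = false := by
        unfold pvCgrp
        have hf : decide (1 < (PySem.Set.ofList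
            ((pvGrp L (pvKeyAt L t)).map (fun j => pvSid (L.getD j [])))).length) = false := by
          apply decide_eq_false
          rw [hgrp, List.map_cons]
          intro hone
          exact hany ((pvOne_lt_ofList_iff _ _).mp hone)
        rw [hf, Bool.and_false]
      rw [hC, Bool.false_and]
      rfl
  · rw [if_neg hlen]
    apply hnoop
    unfold pvF
    have hC : pvCgrp L (pvKeyAt L t) = false := by
      unfold pvCgrp
      rw [decide_eq_false hlen, Bool.false_and]
    rw [hC, Bool.false_and]
    rfl

theorem pvB_eq (L : List (List (String × String))) :
    handle_duplicate_metadata_alt L = pvBlend L (fun _ => true) := by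
  rw [pvB_fold, pvEnumerate_eq, List.foldl_map]
  have main : ∀ t, t ≤ L.length →
      (List.range t).foldl (fun acc (j : Nat) => pvStepB (L.map pvMetaKey) (PySem.List.len L) acc
          ((j : Int), L.getD j [])) L
        = pvBlend L (fun j => decide (j < t)) := by
    intro t
    induction t with
    | zero =>
      intro _
      rw [List.range_zero, List.foldl_nil]
      rw [show (fun j => decide (j < 0)) = (fun _ => false) from by funext j; simp,
        pvBlend_false]
    | succ t ih =>
      intro hle
      rw [List.range_succ, List.foldl_append, ih (by omega), List.foldl_cons, List.foldl_nil]
      exact pvB_step L (by omega)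
  rw [main L.length le_rfl]
  apply pvBlend_congr
  intro j hj
  simp [hj]

theorem pvMain : ∀ (L : List (List (String × String))),
    handle_duplicate_metadata L = handle_duplicate_metadata_alt L := by
  intro L
  rw [pvA_eq, pvB_eq]

-- ===== VERDICT (by name: the statement is the Claim_ definition above) =====
theorem handle_duplicate_metadata_spec : Claim_equal_handle_duplicate_metadata := by
  intro L _ _
  unfold Spec_handle_duplicate_metadata
  exact pvMain L
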